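-- pv_equiv track=rewrite | github.com/VAIBHAV-VOLT/emailphishing | phishingtool/url_analyzer.py | suspicious_domain_pattern
-- ===== SOURCE A (Python) =====
-- RISKY_TLDS = [".xyz", ".top", ".click", ".ru", ".zip"]
--
-- def suspicious_domain_pattern(domain: str) -> bool:
--     """Quick heuristic checks - no DNS"""
--     if len(domain) > 30:
--         return True
--     if any(domain.endswith(tld) for tld in RISKY_TLDS):
--         return True
--     # Only count consecutive digits
--     max_consecutive_digits = 0
--     consecutive = 0
--     for c in domain:
--         if c.isdigit():
--             consecutive += 1
--             max_consecutive_digits = max(max_consecutive_digits, consecutive)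
--         else:
--             consecutive = 0
--
--     if max_consecutive_digits >= 4:
--         return True
--
--     return False
-- ===== SOURCE B (Python) =====
-- RISKY_TLDS = [".xyz", ".top", ".click", ".ru", ".zip"]
--
-- def suspicious_domain_pattern(domain: str) -> bool:
--     """Quick heuristic checks - no DNS"""
--     if len(domain) > 30:
--         return True
--     if any(domain.endswith(tld) for tld in RISKY_TLDS):
--         return True
--     # Sliding-window test: a run of >= 4 consecutive digits exists
--     # iff some 4-character window consists entirely of digits.
--     return any(all(c.isdigit() for c in domain[i:i + 4])
--                for i in range(len(domain) - 3))
-- ===== Notes on version B (the rewrite author's own statement) =====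
-- stated objective: alternative
-- what changed: Replaces A's longest-digit-run computation (running counter + max accumulator) with a sliding-window existence test: the domain is suspicious iff some 4-character window is entirely digits; the length and TLD checks keep their order.
import Mathlib
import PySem

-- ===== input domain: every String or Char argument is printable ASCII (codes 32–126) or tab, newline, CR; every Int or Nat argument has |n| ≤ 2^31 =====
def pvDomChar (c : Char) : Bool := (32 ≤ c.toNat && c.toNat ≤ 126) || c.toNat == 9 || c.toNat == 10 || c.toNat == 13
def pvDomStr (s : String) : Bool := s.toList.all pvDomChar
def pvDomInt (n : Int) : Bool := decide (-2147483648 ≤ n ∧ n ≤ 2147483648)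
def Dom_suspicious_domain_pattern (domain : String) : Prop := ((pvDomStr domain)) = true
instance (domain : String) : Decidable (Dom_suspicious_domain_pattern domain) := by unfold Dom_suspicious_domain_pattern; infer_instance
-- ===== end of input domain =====

-- B replaces A's longest-digit-run computation with a sliding-window existence test
-- (some 4-character window is all digits); objective: alternative, same cost.

def RISKY_TLDS : List String := [".xyz", ".top", ".click", ".ru", ".zip"]

-- ===== PORT A =====
-- A's loop: fold carrying (max_consecutive_digits, consecutive)
def suspicious_domain_pattern (domain : String) : Bool :=
  if PySem.Str.len domain > 30 then true
  else if RISKY_TLDS.any (fun tld => PySem.Str.endswith domain tld) then true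
  else
    decide ((domain.toList.foldl
      (fun (p : Nat × Nat) c =>
        if PySem.Chars.isdigit c then (max p.1 (p.2 + 1), p.2 + 1) else (p.1, 0))
      (0, 0)).1 ≥ 4)

-- ===== PORT B =====
-- Source B's 'any(... for i in range(len(domain) - 3))' with the inner
-- 'all(c.isdigit() for c in domain[i:i+4])'; for 0 ≤ i the slice domain[i:i+4]
-- is exactly (drop i).take 4, and Python's range(n-3) is empty for n < 3,
-- matching Nat subtraction.
def suspicious_domain_pattern_alt (domain : String) : Bool :=
  if PySem.Str.len domain > 30 then true
  else if RISKY_TLDS.any (fun tld => PySem.Str.endswith domain tld) then true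
  else
    (List.range (domain.toList.length - 3)).any
      (fun i => ((domain.toList.drop i).take 4).all PySem.Chars.isdigit)

-- ===== PRECONDITION & SPEC =====
def Spec_suspicious_domain_pattern (domain : String) (out : Bool) : Prop := out = suspicious_domain_pattern_alt domain
instance (domain : String) (out : Bool) : Decidable (Spec_suspicious_domain_pattern domain out) := by unfold Spec_suspicious_domain_pattern; infer_instance

-- ===== CLAIM (what is proved, stated in full; the proofs are below) =====
def Claim_equal_suspicious_domain_pattern : Prop := ∀ (domain : String), Dom_suspicious_domain_pattern domain → Spec_suspicious_domain_pattern domain (suspicious_domain_pattern domain)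

-- ===== LEMMAS AND PROOFS =====

-- proof-side helper: the longest run of digits, by maximal-run recursion
def pvMaxDigitRun : List Char → Nat
  | [] => 0
  | c :: cs =>
    if PySem.Chars.isdigit c then
      max (1 + (cs.takeWhile PySem.Chars.isdigit).length)
          (pvMaxDigitRun (cs.dropWhile PySem.Chars.isdigit))
    else pvMaxDigitRun cs
termination_by l => l.length
decreasing_by
  · simpa [Nat.lt_succ_iff] using List.length_dropWhile_le PySem.Chars.isdigit cs
  · simp

-- the run-scanner splits off the leading digit run
lemma pvMaxDigitRun_eq (l : List Char) :
    pvMaxDigitRun l =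
      max (l.takeWhile PySem.Chars.isdigit).length
          (pvMaxDigitRun (l.dropWhile PySem.Chars.isdigit)) := by
  cases l with
  | nil => simp [pvMaxDigitRun]
  | cons c cs =>
    by_cases h : PySem.Chars.isdigit c
    · simp [pvMaxDigitRun, h, Nat.add_comm]
    · simp [pvMaxDigitRun, h]

lemma pvMaxDigitRun_cons_le (c : Char) (cs : List Char) :
    pvMaxDigitRun cs ≤ pvMaxDigitRun (c :: cs) := by
  by_cases h : PySem.Chars.isdigit c
  · rw [show pvMaxDigitRun (c :: cs) =
        max (1 + (cs.takeWhile PySem.Chars.isdigit).length)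
            (pvMaxDigitRun (cs.dropWhile PySem.Chars.isdigit)) from by
      simp [pvMaxDigitRun, h]]
    rw [pvMaxDigitRun_eq cs]
    omega
  · simp [pvMaxDigitRun, h]

-- invariant of A's fold: its max component equals pvMaxDigitRun
lemma pvFoldA_fst (l : List Char) (m c : Nat) (h : c ≤ m) :
    (l.foldl
      (fun (p : Nat × Nat) ch =>
        if PySem.Chars.isdigit ch then (max p.1 (p.2 + 1), p.2 + 1) else (p.1, 0))
      (m, c)).1 =
    max m (max (c + (l.takeWhile PySem.Chars.isdigit).length)
               (pvMaxDigitRun (l.dropWhile PySem.Chars.isdigit))) := by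
  induction l generalizing m c with
  | nil => simp [pvMaxDigitRun]; omega
  | cons x xs ih =>
    by_cases hx : PySem.Chars.isdigit x
    · simp only [List.foldl_cons, List.takeWhile_cons, List.dropWhile_cons, hx, if_true]
      rw [ih (max m (c + 1)) (c + 1) (le_max_right _ _)]
      simp only [List.length_cons]
      omega
    · simp only [List.foldl_cons, hx, if_neg, Bool.false_eq_true, not_false_iff,
        List.takeWhile_cons, List.dropWhile_cons]
      rw [ih m 0 (Nat.zero_le _)]
      rw [show pvMaxDigitRun (x :: xs) = pvMaxDigitRun xs from by simp [pvMaxDigitRun, hx]]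
      rw [pvMaxDigitRun_eq xs]
      simp only [List.length_nil]
      omega

-- a prefix of the digit-takeWhile is all digits
lemma pvTakeAll_of_le_takeWhile {p : Char → Bool} {l : List Char} {k : Nat}
    (h : k ≤ (l.takeWhile p).length) : (l.take k).all p = true := by
  induction l generalizing k with
  | nil => simp at h; simp [h]
  | cons c cs ih =>
    cases k with
    | zero => simp
    | succ k =>
      by_cases hc : p c
      · simp only [List.takeWhile_cons, hc, if_true, List.length_cons,
          Nat.succ_le_succ_iff] at h
        simp [hc, ih h]
      · simp [hc] at h
  
-- conversely, an all-digit take of in-range length bounds the takeWhile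
lemma pvLe_takeWhile_of_take_all {p : Char → Bool} {l : List Char} {k : Nat}
    (hlen : k ≤ l.length) (h : (l.take k).all p = true) :
    k ≤ (l.takeWhile p).length := by
  induction l generalizing k with
  | nil => simpa using hlen
  | cons c cs ih =>
    cases k with
    | zero => simp
    | succ k =>
      simp only [List.take_succ_cons, List.all_cons, Bool.and_eq_true] at h
      simp only [List.takeWhile_cons, h.1, if_true, List.length_cons,
        Nat.succ_le_succ_iff]
      exact ih (by simpa using hlen) h.2

-- main characterization: the longest digit run reaches k iff some k-window is all digits
lemma pvMaxDigitRun_ge_iff (k : Nat) (hk : 0 < k) (l : List Char) :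
    k ≤ pvMaxDigitRun l ↔
      ∃ i, i + k ≤ l.length ∧ ((l.drop i).take k).all PySem.Chars.isdigit = true := by
  constructor
  · intro h
    induction l with
    | nil => simp [pvMaxDigitRun] at h; omega
    | cons c cs ih =>
      by_cases hc : PySem.Chars.isdigit c
      · rw [show pvMaxDigitRun (c :: cs) =
            max (1 + (cs.takeWhile PySem.Chars.isdigit).length)
                (pvMaxDigitRun (cs.dropWhile PySem.Chars.isdigit)) from by
          simp [pvMaxDigitRun, hc]] at h
        rcases le_max_iff.mp h with hcase | hcase
        · -- window at 0: head run is long enough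
          refine ⟨0, ?_, ?_⟩
          · have := (List.takeWhile_prefix (p := PySem.Chars.isdigit) (l := cs)).length_le
            simp only [List.length_cons]; omega
          · apply pvTakeAll_of_le_takeWhile (l := c :: cs)
            simp only [List.takeWhile_cons, hc, if_true, List.length_cons]
            omega
        · -- run lies further right; it is in cs too
          have hcs : k ≤ pvMaxDigitRun cs := by
            rw [pvMaxDigitRun_eq cs]
            exact le_trans hcase (le_max_right _ _)
          obtain ⟨i, hi, hall⟩ := ih hcs
          exact ⟨i + 1, by simp only [List.length_cons]; omega, by simpa using hall⟩
      · rw [show pvMaxDigitRun (c :: cs) = pvMaxDigitRun cs from by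
          simp [pvMaxDigitRun, hc]] at h
        obtain ⟨i, hi, hall⟩ := ih h
        exact ⟨i + 1, by simp only [List.length_cons]; omega, by simpa using hall⟩
  · rintro ⟨i, hi, hall⟩
    induction l generalizing i with
    | nil => simp at hi; omega
    | cons c cs ih =>
      cases i with
      | zero =>
        simp only [List.drop_zero] at hall
        have htw : k ≤ ((c :: cs).takeWhile PySem.Chars.isdigit).length :=
          pvLe_takeWhile_of_take_all (by simpa using hi) hall
        rw [pvMaxDigitRun_eq (c :: cs)]
        omega
      | succ i =>
        have : k ≤ pvMaxDigitRun cs :=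
          ih i (by simpa [Nat.succ_add] using hi) (by simpa using hall)
        exact le_trans this (pvMaxDigitRun_cons_le c cs)

-- ===== VERDICT (by name: the statement is the Claim_ definition above) =====
theorem suspicious_domain_pattern_spec : Claim_equal_suspicious_domain_pattern := by
  intro domain _
  unfold Spec_suspicious_domain_pattern suspicious_domain_pattern suspicious_domain_pattern_alt
  split_ifs with h1 h2
  · rfl
  · rfl
  · rw [pvFoldA_fst domain.toList 0 0 (le_refl 0)]
    rw [Bool.eq_iff_iff]
    simp only [ge_iff_le, decide_eq_true_eq, List.any_eq_true, List.mem_range,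
      Nat.zero_add, Nat.zero_max]
    rw [← pvMaxDigitRun_eq domain.toList]
    rw [pvMaxDigitRun_ge_iff 4 (by omega) domain.toList]
    constructor
    · rintro ⟨i, hi, hall⟩; exact ⟨i, by omega, hall⟩
    · rintro ⟨i, hi, hall⟩; exact ⟨i, by omega, hall⟩
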